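-- pv_equiv track=rewrite | github.com/alkTHG/22_introduction_to_programming | 07_More_Structured_types/hangman.py | match_the_gap
-- ===== SOURCE A (Python) =====
-- def match_the_gap(my_word, other_word):
--     my_word = my_word.strip()
--     other_word = other_word.strip()
--     if len(my_word) != len(other_word):
--         return False
--     for i, letter in enumerate(my_word):
--         if my_word[i] == '-' or my_word[i] == other_word[i]:
--             continue
--         elif my_word[i] != '-' and my_word[i] != other_word[i]:
--             return False
--     return True
-- ===== SOURCE B (Python) =====
-- def match_the_gap(my_word, other_word):
--     m = my_word.strip()
--     o = other_word.strip()
--     if len(m) != len(o):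
--         return False
--     pos = 0
--     for seg in m.split('-'):
--         if o[pos:pos + len(seg)] != seg:
--             return False
--         pos += len(seg) + 1
--     return True
-- ===== Notes on version B (the rewrite author's own statement) =====
-- stated objective: alternative
-- what changed: Instead of A's per-character index loop, B splits my_word on '-' and checks that each dash-free segment occurs verbatim in other_word at its cumulative offset via slice comparisons (plus the length check).
import Mathlib
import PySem

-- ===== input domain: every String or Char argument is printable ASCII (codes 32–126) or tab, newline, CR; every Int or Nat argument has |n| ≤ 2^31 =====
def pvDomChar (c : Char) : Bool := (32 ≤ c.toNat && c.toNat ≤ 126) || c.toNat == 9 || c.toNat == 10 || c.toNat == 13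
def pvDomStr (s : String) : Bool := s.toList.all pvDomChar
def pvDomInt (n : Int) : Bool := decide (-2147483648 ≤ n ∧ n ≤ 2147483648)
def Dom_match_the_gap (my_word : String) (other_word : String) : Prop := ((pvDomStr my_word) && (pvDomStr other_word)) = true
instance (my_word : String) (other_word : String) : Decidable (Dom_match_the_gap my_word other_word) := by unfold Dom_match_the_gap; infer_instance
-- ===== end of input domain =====

-- B replaces A's per-character index loop by a segment scan: split my_word on '-' and
-- compare each dash-free segment with the slice of other_word at its cumulative offset
-- (alternative decomposition, same cost).

-- ===== PORT A =====
-- the 'for i, letter in enumerate(my_word)' loop; indices are always in range, so my_word[i] is PySem.List.pyGetD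
def matchTheGapLoop (m o : List Char) : List (Int × Char) → Bool
  | [] => true
  | (i, _letter) :: rest =>
      if PySem.List.pyGetD m i ' ' == '-' || PySem.List.pyGetD m i ' ' == PySem.List.pyGetD o i ' ' then
        matchTheGapLoop m o rest
      else if PySem.List.pyGetD m i ' ' != '-' && PySem.List.pyGetD m i ' ' != PySem.List.pyGetD o i ' ' then
        false
      else
        matchTheGapLoop m o rest

def match_the_gap (my_word : String) (other_word : String) : Bool :=
  let mw := PySem.Str.strip my_word
  let ow := PySem.Str.strip other_word
  if PySem.Str.len mw ≠ PySem.Str.len ow then false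
  else matchTheGapLoop mw.toList ow.toList (PySem.List.enumerate mw.toList 0)

-- ===== PORT B =====
-- the 'for seg in m.split('-')' loop, carrying pos; o[pos:pos+len(seg)] is PySem.List.slice
def segLoopB (o : List Char) : List (List Char) → Int → Bool
  | [], _ => true
  | seg :: rest, pos =>
      if PySem.List.slice o (some pos) (some (pos + (seg.length : Int))) ≠ seg then false
      else segLoopB o rest (pos + (seg.length : Int) + 1)

def match_the_gap_alt (my_word : String) (other_word : String) : Bool :=
  let m := PySem.Str.strip my_word
  let o := PySem.Str.strip other_word
  if PySem.Str.len m ≠ PySem.Str.len o then false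
  else segLoopB o.toList (List.splitOn '-' m.toList) 0

-- ===== PRECONDITION & SPEC =====
def Spec_match_the_gap (my_word : String) (other_word : String) (out : Bool) : Prop := out = match_the_gap_alt my_word other_word
instance (my_word : String) (other_word : String) (out : Bool) : Decidable (Spec_match_the_gap my_word other_word out) := by unfold Spec_match_the_gap; infer_instance

-- ===== CLAIM (what is proved, stated in full; the proofs are below) =====
def Claim_equal_match_the_gap : Prop := ∀ (my_word : String) (other_word : String), Dom_match_the_gap my_word other_word → Spec_match_the_gap my_word other_word (match_the_gap my_word other_word)

-- ===== LEMMAS AND PROOFS =====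

-- A's loop over enumerate equals the all-positions condition
lemma matchTheGapLoop_eq (m o : List Char) (hlen : m.length = o.length) :
    ∀ (n k : Nat), k ≤ m.length → m.length - k = n →
    matchTheGapLoop m o (PySem.List.enumerate (m.drop k) k) =
      ((m.drop k).zip (o.drop k)).all (fun p => p.1 == '-' || p.1 == p.2) := by
  intro n
  induction n with
  | zero =>
      intro k hk hn
      have hk' : k = m.length := by omega
      subst hk'
      simp [List.drop_length, matchTheGapLoop]
  | succ n ih =>
      intro k hk hn
      have hklt : k < m.length := by omega
      have hko : k < o.length := by omega
      have hm : m.drop k = m[k] :: m.drop (k + 1) := List.drop_eq_getElem_cons hklt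
      have ho : o.drop k = o[k] :: o.drop (k + 1) := List.drop_eq_getElem_cons hko
      rw [hm, ho, PySem.List.enumerate_cons]
      have hgm : PySem.List.pyGetD m (k : Int) ' ' = m[k] := by
        rw [PySem.List.pyGetD_natCast]; simp [List.getD, hklt]
      have hgo : PySem.List.pyGetD o (k : Int) ' ' = o[k] := by
        rw [PySem.List.pyGetD_natCast]; simp [List.getD, hko]
      have ihk := ih (k + 1) (by omega) (by omega)
      rw [show ((k : Int) + 1) = ((k + 1 : Nat) : Int) by push_cast; ring]
      by_cases hc : (m[k] == '-' || m[k] == o[k]) = true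
      · simp only [matchTheGapLoop, hgm, hgo, hc, if_pos, List.zip_cons_cons, List.all_cons]
        rw [ihk]
        simp
      · have hc0 : (m[k] == '-' || m[k] == o[k]) = false := by
          simpa using hc
        have hc' : (m[k] != '-' && m[k] != o[k]) = true := by
          simp only [Bool.or_eq_true, not_or] at hc
          simp [bne, hc.1, hc.2]
        simp only [matchTheGapLoop, hgm, hgo, List.zip_cons_cons, List.all_cons]
        rw [if_neg hc, if_pos hc', hc0]
        simp

-- splitOnP never returns the empty list of segments
lemma splitOnP_ne_nil {α : Type} (p : α → Bool) (l : List α) : List.splitOnP p l ≠ [] := by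
  induction l with
  | nil => simp [List.splitOnP_nil]
  | cons a l ih =>
      rw [List.splitOnP_cons]
      split_ifs
      · simp
      · cases h : List.splitOnP p l with
        | nil => exact absurd h ih
        | cons s rest => simp [List.modifyHead]

-- one step of segLoopB on a head segment with its first char peeled off
lemma segLoopB_peel (s : List Char) (rest : List (List Char)) (pre o : List Char) (b c : Char) :
    segLoopB (pre ++ b :: o) ((c :: s) :: rest) (pre.length : Int)
      = ((b == c) && segLoopB ((pre ++ [b]) ++ o) (s :: rest) (((pre ++ [b]).length : Int))) := by
  have hassoc : pre ++ b :: o = (pre ++ [b]) ++ o := by simp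
  have hslice1 : PySem.List.slice (pre ++ b :: o) (some (pre.length : Int))
      (some ((pre.length : Int) + ((c :: s).length : Int))) = b :: o.take s.length := by
    rw [show ((c :: s).length : Int) = ((s.length + 1 : Nat) : Int) by simp,
        PySem.List.slice_natCast_add]
    rw [List.drop_left]
    simp [List.take_succ_cons]
  have hslice2 : PySem.List.slice ((pre ++ [b]) ++ o) (some ((pre ++ [b]).length : Int))
      (some (((pre ++ [b]).length : Int) + ((s).length : Int))) = o.take s.length := by
    rw [PySem.List.slice_natCast_add, List.drop_left]
  simp only [segLoopB, hslice1, hslice2]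
  by_cases hbc : b = c
  · subst hbc
    simp only [beq_self_eq_true, Bool.true_and]
    by_cases hts : o.take s.length = s
    · rw [if_neg (by simp [hts]), if_neg (by simp [hts]), hassoc]
      congr 1
      push_cast [List.length_cons, List.length_append, List.length_nil]
      ring
    · rw [if_pos (by simp [hts]), if_pos (by simp [hts])]
  · have : (b == c) = false := by simp [hbc]
    rw [this, Bool.false_and, if_pos]
    simp [hbc]

-- B's segment loop over splitOn equals the all-positions condition
lemma segLoopB_splitOn : ∀ (m pre o : List Char), m.length = o.length →
    segLoopB (pre ++ o) (List.splitOn '-' m) (pre.length : Int) =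
      (m.zip o).all (fun p => p.1 == '-' || p.1 == p.2) := by
  intro m
  induction m with
  | nil =>
      intro pre o h
      have ho : o = [] := by cases o <;> simp_all
      subst ho
      simp only [List.splitOn, List.splitOnP_nil, segLoopB]
      rw [if_neg]
      · simp
      · rw [show (([] : List Char).length : Int) = ((0 : Nat) : Int) by simp,
            PySem.List.slice_natCast_add]
        simp
  | cons c m' ih =>
      intro pre o h
      cases o with
      | nil => simp at h
      | cons b o' =>
          have h' : m'.length = o'.length := by simpa using h
          by_cases hc : c = '-'
          · subst hc
            have hsplit : List.splitOn '-' ('-' :: m') = [] :: List.splitOn '-' m' := by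
              simp [List.splitOn, List.splitOnP_cons]
            rw [hsplit]
            have hstep : segLoopB (pre ++ b :: o') ([] :: List.splitOn '-' m') (pre.length : Int)
                = segLoopB ((pre ++ [b]) ++ o') (List.splitOn '-' m') (((pre ++ [b]).length : Int)) := by
              have hsl : PySem.List.slice (pre ++ b :: o') (some (pre.length : Int))
                  (some (pre.length : Int)) = ([] : List Char) := by
                rw [PySem.List.slice_natCast]
                simp
              simp only [segLoopB]
              rw [if_neg (by simp [hsl]),
                  show pre ++ b :: o' = (pre ++ [b]) ++ o' by simp,
                  show (pre.length : Int) + (([] : List Char).length : Int) + 1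
                      = ((pre ++ [b]).length : Int) by simp]
            rw [hstep, ih (pre ++ [b]) o' h']
            simp
          · have hne := splitOnP_ne_nil (fun x => x == '-') m'
            cases hsp : List.splitOnP (fun x => x == '-') m' with
            | nil => exact absurd hsp hne
            | cons s rest =>
                have hsplit : List.splitOn '-' (c :: m') = (c :: s) :: rest := by
                  simp [List.splitOn, List.splitOnP_cons, hc, hsp, List.modifyHead]
                have hsplit' : List.splitOn '-' m' = s :: rest := by
                  simp [List.splitOn, hsp]
                rw [hsplit, segLoopB_peel, ← hsplit', ih (pre ++ [b]) o' h']
                have hcond : (c == '-' || c == b) = (b == c) := by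
                  have h1 : (c == '-') = false := by simp [hc]
                  have h2 : (c == b) = (b == c) := by
                    by_cases hcb : c = b
                    · subst hcb; rfl
                    · simp [hcb, Ne.symm hcb]
                  rw [h1, Bool.false_or, h2]
                simp [hcond]

-- ===== VERDICT (by name: the statement is the Claim_ definition above) =====
theorem match_the_gap_spec : Claim_equal_match_the_gap := by
  intro my_word other_word _
  unfold Spec_match_the_gap match_the_gap match_the_gap_alt
  simp only [PySem.Str.len_eq]
  generalize PySem.Str.strip my_word = m
  generalize PySem.Str.strip other_word = o
  by_cases h : m.toList.length = o.toList.length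
  · have hloop := matchTheGapLoop_eq m.toList o.toList h (m.toList.length - 0) 0 (by omega) rfl
    simp only [List.drop_zero, Nat.cast_zero] at hloop
    have hseg := segLoopB_splitOn m.toList [] o.toList h
    simp only [List.nil_append, List.length_nil, Nat.cast_zero] at hseg
    rw [if_neg (by omega), if_neg (by omega), hloop, hseg]
  · rw [if_pos (by omega), if_pos (by omega)]
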